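-- pv_equiv track=rewrite | github.com/kavyaktj1/GE_CICD_Migration_Boto3 | Scripts/Crawler/crawler_metadata_prod.py | change_bucket_name
-- ===== SOURCE A (Python) =====
-- def change_bucket_name(s3url, bucket_name):
--     st = s3url[5:]
--     st = st.split('/')
--     st[0] = bucket_name
--     new_s3_url = s3url[0:5]
--     for s in st:
--         new_s3_url+= s+'/'
--     new_s3_url = new_s3_url[0:len(new_s3_url)-1]
--     return new_s3_url
-- ===== SOURCE B (Python) =====
-- def change_bucket_name(s3url, bucket_name):
--     _, sep, tail = s3url[5:].partition('/')
--     return s3url[:5] + bucket_name + sep + tail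
-- ===== Notes on version B (the rewrite author's own statement) =====
-- stated objective: idiomatic
-- what changed: Replaced the split-into-list / mutate-element-0 / rejoin-in-a-loop / trim-trailing-slash scheme with a single str.partition at the first '/': the segment list, the indexed assignment, the accumulation loop and the trim all disappear.
import Mathlib
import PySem

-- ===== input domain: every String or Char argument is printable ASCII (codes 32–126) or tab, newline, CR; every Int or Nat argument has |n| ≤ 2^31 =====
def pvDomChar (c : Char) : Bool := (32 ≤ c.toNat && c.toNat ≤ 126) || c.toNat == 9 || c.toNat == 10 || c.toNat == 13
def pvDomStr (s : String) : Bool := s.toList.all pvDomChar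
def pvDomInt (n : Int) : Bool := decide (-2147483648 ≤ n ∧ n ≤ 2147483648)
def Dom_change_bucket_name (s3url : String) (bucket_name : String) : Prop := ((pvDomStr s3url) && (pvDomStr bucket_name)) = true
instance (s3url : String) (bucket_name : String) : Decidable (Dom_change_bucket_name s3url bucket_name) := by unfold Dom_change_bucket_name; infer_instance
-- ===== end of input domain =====

-- B replaces A's split-list / mutate-index-0 / rejoin-loop / trim-trailing-slash scheme with a
-- single partition at the first '/' (idiomatic; same cost).

-- ===== PORT A =====
def change_bucket_name (s3url : String) (bucket_name : String) : String :=
  let st0 := PySem.Chars.slice s3url.toList (some 5) none          -- st = s3url[5:]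
  let st1 := PySem.Chars.splitOn st0 ['/']                         -- st = st.split('/')
  -- st[0] = bucket_name : split(...) is never empty, so the assignment never raises
  let st2 := st1.set 0 bucket_name.toList
  let pre := PySem.Chars.slice s3url.toList (some 0) (some 5)      -- new_s3_url = s3url[0:5]
  let full := st2.foldl (fun acc s => acc ++ s ++ ['/']) pre       -- for s in st: new_s3_url += s+'/'
  String.ofList (PySem.Chars.slice full (some 0) (some ((full.length : Int) - 1)))  -- new[0:len-1]

-- ===== PORT B =====
def change_bucket_name_alt (s3url : String) (bucket_name : String) : String :=
  let rest := PySem.Chars.slice s3url.toList (some 5) none         -- s3url[5:]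
  -- rest.partition('/') hand-ported (exact): sep and tail of (head, sep, tail); head is unused
  let sepTail :=
    if '/' ∈ rest then (['/'], (rest.dropWhile (· ≠ '/')).tail)
    else (([] : List Char), ([] : List Char))
  String.ofList (PySem.Chars.slice s3url.toList (some 0) (some 5)
                  ++ bucket_name.toList ++ sepTail.1 ++ sepTail.2)

-- ===== PRECONDITION & SPEC =====
def Spec_change_bucket_name (s3url : String) (bucket_name : String) (out : String) : Prop := out = change_bucket_name_alt s3url bucket_name
instance (s3url : String) (bucket_name : String) (out : String) : Decidable (Spec_change_bucket_name s3url bucket_name out) := by unfold Spec_change_bucket_name; infer_instance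

-- ===== CLAIM (what is proved, stated in full; the proofs are below) =====
def Claim_equal_change_bucket_name : Prop := ∀ (s3url : String) (bucket_name : String), Dom_change_bucket_name s3url bucket_name → Spec_change_bucket_name s3url bucket_name (change_bucket_name s3url bucket_name)

-- ===== LEMMAS AND PROOFS =====

-- structural characterisation of split on the single character '/'
def splitSlash : List Char → List (List Char)
  | [] => [[]]
  | c :: r =>
    if c = '/' then [] :: splitSlash r
    else match splitSlash r with
         | p :: ps => (c :: p) :: ps
         | [] => [[c]]

-- '/'-join of the pieces (inverse of splitSlash)
def joinS : List (List Char) → List Char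
  | [] => []
  | [p] => p
  | p :: q :: ps => p ++ '/' :: joinS (q :: ps)

theorem splitSlash_ne_nil (l : List Char) : splitSlash l ≠ [] := by
  induction l with
  | nil => simp [splitSlash]
  | cons c r ih =>
    simp only [splitSlash]
    split_ifs
    · simp
    · cases h : splitSlash r with
      | nil => exact absurd h ih
      | cons p ps => simp

theorem go_spec (fuel : Nat) : ∀ (l cur : List Char) (acc : List (List Char)),
    l.length < fuel →
    PySem.Chars.splitOn.go ['/'] fuel l cur acc
      = acc.reverse ++ ((cur.reverse ++ (splitSlash l).head!) :: (splitSlash l).tail) := by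
  induction fuel with
  | zero => intro l cur acc h; omega
  | succ fuel ih =>
    intro l cur acc h
    cases l with
    | nil =>
      have : PySem.Chars.splitOn.go ['/'] (fuel+1) [] cur acc = (cur.reverse :: acc).reverse := by
        simp [PySem.Chars.splitOn.go]
      rw [this]; simp [splitSlash]
    | cons c rest =>
      by_cases hc : c = '/'
      · subst hc
        have : PySem.Chars.splitOn.go ['/'] (fuel+1) ('/' :: rest) cur acc
            = PySem.Chars.splitOn.go ['/'] fuel rest [] (cur.reverse :: acc) := by
          rw [PySem.Chars.splitOn.go]; simp [List.isPrefixOf]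
        rw [this, ih rest [] (cur.reverse :: acc) (by simpa using Nat.lt_of_succ_lt_succ h)]
        obtain ⟨p, ps, hps⟩ := List.exists_cons_of_ne_nil (splitSlash_ne_nil rest)
        simp [splitSlash, hps]
      · have : PySem.Chars.splitOn.go ['/'] (fuel+1) (c :: rest) cur acc
            = PySem.Chars.splitOn.go ['/'] fuel rest (c :: cur) acc := by
          rw [PySem.Chars.splitOn.go]; simp [List.isPrefixOf]
          exact fun h' => absurd h'.symm hc
        rw [this, ih rest (c :: cur) acc (by simpa using Nat.lt_of_succ_lt_succ h)]
        obtain ⟨p, ps, hps⟩ := List.exists_cons_of_ne_nil (splitSlash_ne_nil rest)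
        simp [splitSlash, hps, hc]

theorem splitOn_eq_splitSlash (l : List Char) :
    PySem.Chars.splitOn l ['/'] = splitSlash l := by
  obtain ⟨p, ps, hps⟩ := List.exists_cons_of_ne_nil (splitSlash_ne_nil l)
  rw [PySem.Chars.splitOn, go_spec (l.length + 1) l [] [] (by omega)]
  simp [hps]

theorem splitSlash_not_mem {l : List Char} (h : '/' ∉ l) : splitSlash l = [l] := by
  induction l with
  | nil => simp [splitSlash]
  | cons c r ih =>
    simp only [List.mem_cons, not_or] at h
    simp [splitSlash, Ne.symm h.1, ih h.2]

theorem splitSlash_mem {l : List Char} (h : '/' ∈ l) :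
    splitSlash l = l.takeWhile (· ≠ '/') :: splitSlash ((l.dropWhile (· ≠ '/')).tail) := by
  induction l with
  | nil => simp at h
  | cons c r ih =>
    by_cases hc : c = '/'
    · subst hc; simp [splitSlash, List.takeWhile, List.dropWhile]
    · have hr : '/' ∈ r := by
        rcases List.mem_cons.mp h with h1 | h1
        · exact absurd h1.symm hc
        · exact h1
      obtain ⟨p, ps, hps⟩ := List.exists_cons_of_ne_nil (splitSlash_ne_nil r)
      simp only [splitSlash, if_neg hc, hps]
      rw [hps] at ih
      have := ih hr
      simp [List.takeWhile, List.dropWhile, hc, List.cons.injEq] at this ⊢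
      exact ⟨this.1, this.2⟩

theorem joinS_splitSlash (l : List Char) : joinS (splitSlash l) = l := by
  induction l with
  | nil => simp [splitSlash, joinS]
  | cons c r ih =>
    obtain ⟨p, ps, hps⟩ := List.exists_cons_of_ne_nil (splitSlash_ne_nil r)
    by_cases hc : c = '/'
    · subst hc
      have h1 : splitSlash ('/' :: r) = [] :: p :: ps := by simp [splitSlash, hps]
      have h2 : joinS ([] :: p :: ps) = '/' :: joinS (p :: ps) := by simp [joinS]
      rw [h1, h2, ← hps, ih]
    · simp only [splitSlash, if_neg hc, hps]
      cases ps with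
      | nil => rw [hps] at ih; simpa [joinS] using ih
      | cons q qs =>
        rw [hps] at ih
        simpa [joinS] using ih

theorem foldl_join (ps : List (List Char)) : ∀ (init : List Char), ps ≠ [] →
    ps.foldl (fun acc s => acc ++ s ++ ['/']) init = init ++ joinS ps ++ ['/'] := by
  induction ps with
  | nil => intro init h; exact absurd rfl h
  | cons p ps ih =>
    intro init _
    cases ps with
    | nil => simp [joinS]
    | cons q qs =>
      rw [List.foldl_cons, ih (init ++ p ++ ['/']) (by simp)]
      simp [joinS]

theorem slice_dropLast (xs : List Char) (c : Char) :
    PySem.Chars.slice (xs ++ [c]) (some 0) (some (((xs ++ [c]).length : Int) - 1)) = xs := by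
  simp [pysem, PySem.List.slice, PySem.List.clampIdx]

-- ===== VERDICT (by name: the statement is the Claim_ definition above) =====
theorem change_bucket_name_spec : Claim_equal_change_bucket_name := by
  intro s3url bucket_name _
  unfold Spec_change_bucket_name change_bucket_name change_bucket_name_alt
  simp only []
  set rest := PySem.Chars.slice s3url.toList (some 5) none with hrest
  set pre := PySem.Chars.slice s3url.toList (some 0) (some 5) with hpre
  rw [splitOn_eq_splitSlash]
  by_cases hm : '/' ∈ rest
  · -- first '/' found: pieces after the head rejoin to sep ++ tail
    have hsplit := splitSlash_mem hm
    have hafter := splitSlash_ne_nil ((rest.dropWhile (· ≠ '/')).tail)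
    obtain ⟨q, qs, hq⟩ := List.exists_cons_of_ne_nil hafter
    rw [hsplit, hq]
    have hset : ((rest.takeWhile (· ≠ '/') :: (q :: qs)).set 0 bucket_name.toList)
        = bucket_name.toList :: q :: qs := by simp
    rw [hset, foldl_join _ pre (by simp)]
    have hjoin : joinS (bucket_name.toList :: q :: qs)
        = bucket_name.toList ++ '/' :: joinS (q :: qs) := by simp [joinS]
    have hback : joinS (q :: qs) = (rest.dropWhile (· ≠ '/')).tail := by
      rw [← hq, joinS_splitSlash]
    rw [hjoin, hback]
    rw [show pre ++ (bucket_name.toList ++ '/' :: (rest.dropWhile (· ≠ '/')).tail) ++ ['/']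
        = (pre ++ bucket_name.toList ++ '/' :: (rest.dropWhile (· ≠ '/')).tail) ++ ['/'] by simp,
       slice_dropLast]
    simp [hm]
  · -- no '/': the single piece is replaced wholesale, sep and tail are empty
    rw [splitSlash_not_mem hm]
    have hset : (([rest] : List (List Char)).set 0 bucket_name.toList) = [bucket_name.toList] := by simp
    rw [hset, foldl_join _ pre (by simp)]
    rw [show pre ++ joinS [bucket_name.toList] ++ ['/']
        = (pre ++ bucket_name.toList) ++ ['/'] by simp [joinS], slice_dropLast]
    simp [hm]
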